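-- pv_equiv track=rewrite | github.com/K-Kuyama/Quality-Work-Standalone | backend/activities/modules/ai/util.py | count_correct
-- ===== SOURCE A (Python) =====
-- def count_correct(a_vals, b_vals):
--     # 同じ長さのリストa_valsとb_valsの内容がマッチした数を数える
--     # precision_info[キー] =[アイテムの全体数, マッチした数]
--     i=0
--     precision_info = dict()
--     while i <len(a_vals):
--         id = a_vals[i]
--         if id not in precision_info.keys():
--             if(a_vals[i] == b_vals[i]):
--                 precision_info[id]=[1,1]
--             else:
--                 precision_info[id]=[1,0]
--         else:
--             precision_info[id][0] += 1
--             if(a_vals[i] == b_vals[i]):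
--                 precision_info[id][1] += 1
--         i += 1
--
--     return precision_info
-- ===== SOURCE B (Python) =====
-- def count_correct(a_vals, b_vals):
--     # B: two counting passes (totals, then matches) combined at the end,
--     # instead of A's single pass mutating [total, match] cells in place.
--     totals = {}
--     for v in a_vals:
--         totals[v] = totals.get(v, 0) + 1
--     matches = {}
--     for i in range(len(a_vals)):
--         if a_vals[i] == b_vals[i]:
--             matches[a_vals[i]] = matches.get(a_vals[i], 0) + 1
--     return {k: [t, matches.get(k, 0)] for k, t in totals.items()}
-- ===== Notes on version B (the rewrite author's own statement) =====
-- stated objective: simpler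
-- what changed: A builds the result in one pass that mutates [total, match] list cells inside the dict; B counts totals and matches in two separate counting passes and assembles fresh [total, match] pairs at the end.
import Mathlib
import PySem

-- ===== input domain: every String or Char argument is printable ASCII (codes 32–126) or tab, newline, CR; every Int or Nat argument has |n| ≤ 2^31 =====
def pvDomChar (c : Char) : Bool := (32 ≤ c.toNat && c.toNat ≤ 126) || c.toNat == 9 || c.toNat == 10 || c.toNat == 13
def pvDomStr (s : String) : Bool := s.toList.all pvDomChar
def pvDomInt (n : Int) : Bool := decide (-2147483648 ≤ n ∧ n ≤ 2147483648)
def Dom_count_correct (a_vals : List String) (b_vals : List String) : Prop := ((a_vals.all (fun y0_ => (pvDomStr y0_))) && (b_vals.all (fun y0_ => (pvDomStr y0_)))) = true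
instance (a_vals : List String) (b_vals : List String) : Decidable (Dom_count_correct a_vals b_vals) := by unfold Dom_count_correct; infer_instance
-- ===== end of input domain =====

-- B replaces A's single dict-mutating pass by two counting passes (totals, matchd)
-- combined at the end; equivalence of the RETURN value is proved on Pre_ (b_vals at
-- least as long as a_vals, where Python A returns instead of raising IndexError).

-- ===== PORT A =====
-- precision_info[id][0] += 1; if a_vals[i] == b_vals[i]: precision_info[id][1] += 1
-- (in-place updates of the first two list cells; exact for the 2-element lists A stores)
def pvBumpA (m : Bool) (l : List Int) : List Int :=
  match l with
  | t :: s :: r => (t + 1) :: (if m then s + 1 else s) :: r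
  | _ => l

def count_correct (a_vals : List String) (b_vals : List String) : List (String × List Int) :=
  -- while i < len(a_vals) over i = 0,1,…  (pyGetD is exact for 0 ≤ i < len; Pre_ keeps b_vals long enough)
  let d := (PySem.List.pyRange 0 (PySem.List.len a_vals)).foldl
    (fun d i =>
      let id := PySem.List.pyGetD a_vals i ""
      if d.contains id = false then
        if id == PySem.List.pyGetD b_vals i "" then d.insert id [1, 1]
        else d.insert id [1, 0]
      else
        d.modify id [] (pvBumpA (id == PySem.List.pyGetD b_vals i "")))
    PySem.Dict.empty
  d.items

-- ===== PORT B =====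
def count_correct_alt (a_vals : List String) (b_vals : List String) : List (String × List Int) :=
  let totals := a_vals.foldl (fun d v => d.insert v (d.getD v 0 + 1)) PySem.Dict.empty
  let matchd := (PySem.List.pyRange 0 (PySem.List.len a_vals)).foldl
    (fun d i =>
      if PySem.List.pyGetD a_vals i "" == PySem.List.pyGetD b_vals i "" then
        let k := PySem.List.pyGetD a_vals i ""
        d.insert k (d.getD k 0 + 1)
      else d)
    PySem.Dict.empty
  totals.items.map (fun p => (p.1, [p.2, matchd.getD p.1 0]))

-- ===== PRECONDITION & SPEC =====
-- Pre_: Python A indexes b_vals[i] for every i < len(a_vals), so it raises IndexError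
-- exactly when b_vals is shorter than a_vals; those inputs are excluded.
def Pre_count_correct (a_vals : List String) (b_vals : List String) : Prop :=
  a_vals.length ≤ b_vals.length
instance (a_vals : List String) (b_vals : List String) : Decidable (Pre_count_correct a_vals b_vals) := by unfold Pre_count_correct; infer_instance
def pvWitness_count_correct : List String × List String := (["x", "y", "x"], ["x", "z", "x"])

def Spec_count_correct (a_vals : List String) (b_vals : List String) (out : List (String × List Int)) : Prop := out = count_correct_alt a_vals b_vals
instance (a_vals : List String) (b_vals : List String) (out : List (String × List Int)) : Decidable (Spec_count_correct a_vals b_vals out) := by unfold Spec_count_correct; infer_instance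

-- ===== CLAIM (what is proved, stated in full; the proofs are below) =====
def Claim_equal_count_correct : Prop := ∀ (a_vals : List String) (b_vals : List String), Dom_count_correct a_vals b_vals → Pre_count_correct a_vals b_vals → Spec_count_correct a_vals b_vals (count_correct a_vals b_vals)

-- ===== LEMMAS AND PROOFS =====

-- proof-side abbreviations
def pvKey (a : List String) (i : Nat) : String := PySem.List.pyGetD a (i : Int) ""
def pvHit (a b : List String) (i : Nat) : Bool := pvKey a i == pvKey b i
-- keys of the matched positions among the first n
def pvMK (a b : List String) (n : Nat) : List String :=
  ((List.range n).filter (pvHit a b)).map (pvKey a)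
-- A's loop body, in clean form
def pvStepA (a b : List String) (d : PySem.Dict String (List Int)) (i : Nat) :
    PySem.Dict String (List Int) :=
  if d.contains (pvKey a i) = false then
    if pvHit a b i then d.insert (pvKey a i) [1, 1] else d.insert (pvKey a i) [1, 0]
  else d.modify (pvKey a i) [] (pvBumpA (pvHit a b i))
-- one output row
def pvRow (a b : List String) (n : Nat) (k : String) : String × List Int :=
  (k, [(List.count k (a.take n) : Int), (List.count k (pvMK a b n) : Int)])

theorem pvFold_if_filter {α : Type} (p : Nat → Bool) (g : Nat → α) [BEq α]
    (l : List Nat) (d : PySem.Dict α Int) :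
    l.foldl (fun d i => if p i then (fun d x => d.insert x (d.getD x 0 + 1)) d (g i) else d) d
      = ((l.filter p).map g).foldl (fun d x => d.insert x (d.getD x 0 + 1)) d := by
  induction l generalizing d with
  | nil => rfl
  | cons x xs ih =>
    simp only [List.foldl_cons, List.filter_cons]
    by_cases h : p x = true
    · simp [h, ih]
    · simp [h, ih]

theorem pvMK_sub (a b : List String) (n : Nat) (hn : n ≤ a.length) :
    ∀ k ∈ pvMK a b n, k ∈ a.take n := by
  intro k hk
  unfold pvMK at hk
  simp only [List.mem_map, List.mem_filter, List.mem_range] at hk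
  obtain ⟨i, ⟨hi, _⟩, rfl⟩ := hk
  have hia : (i : Int) < (a.length : Int) := by exact_mod_cast lt_of_lt_of_le hi hn
  rw [pvKey, PySem.List.pyGetD_eq_getElem a "" (by positivity) hia]
  simp only [Int.toNat_natCast]
  exact List.mem_take_iff_getElem.mpr ⟨i, by omega, by simp⟩

theorem pvMK_succ (a b : List String) (n : Nat) :
    pvMK a b (n + 1) = pvMK a b n ++ (if pvHit a b n then [pvKey a n] else []) := by
  unfold pvMK
  rw [List.range_succ, List.filter_append, List.map_append]
  by_cases h : pvHit a b n = true <;> simp [h]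

theorem pvKey_getElem (a : List String) (n : Nat) (h : n < a.length) :
    pvKey a n = a[n] := by
  rw [pvKey, PySem.List.pyGetD_eq_getElem a "" (by positivity) (by exact_mod_cast h)]
  simp

theorem pvOfList_snoc {α : Type} [BEq α] [LawfulBEq α] (l : List α) (x : α) :
    PySem.Set.ofList (l ++ [x])
      = if x ∈ l then PySem.Set.ofList l else PySem.Set.ofList l ++ [x] := by
  rw [PySem.Set.ofList_eq_foldl, List.foldl_append, List.foldl_cons, List.foldl_nil,
    ← PySem.Set.ofList_eq_foldl]
  by_cases h : x ∈ l
  · simp [PySem.Set.add, PySem.Set.mem_ofList, h]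
  · simp [PySem.Set.add, PySem.Set.mem_ofList, h]

-- the main invariant: A's dict after the first n iterations
theorem pvA_items (a b : List String) (n : Nat) (hn : n ≤ a.length) :
    ((List.range n).foldl (pvStepA a b) PySem.Dict.empty).items
      = (PySem.Set.ofList (a.take n)).map (pvRow a b n) := by
  induction n with
  | zero => rfl
  | succ n ih =>
    have hlt : n < a.length := hn
    have hn' : n ≤ a.length := Nat.le_of_lt hlt
    have hitems := ih hn'
    set D := (List.range n).foldl (pvStepA a b) PySem.Dict.empty with hD
    set k0 := pvKey a n with hk0
    have htake : a.take (n + 1) = a.take n ++ [k0] := by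
      rw [List.take_add_one, List.getElem?_eq_getElem hlt, hk0, pvKey_getElem a n hlt]
      rfl
    have hkeys : D.keys = PySem.Set.ofList (a.take n) := by
      simp only [PySem.Dict.keys, hitems, List.map_map]
      simp [Function.comp_def, pvRow]
    have hnd : D.keys.Nodup := hkeys ▸ PySem.Set.nodup_ofList _
    have hc : D.contains k0 = true ↔ k0 ∈ a.take n := by
      rw [PySem.Dict.contains_iff_mem_keys, hkeys, PySem.Set.mem_ofList]
    rw [List.range_succ, List.foldl_append, List.foldl_cons, List.foldl_nil, ← hD]
    have hrow_ne : ∀ k, k ≠ k0 → pvRow a b (n + 1) k = pvRow a b n k := by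
      intro k hkk
      unfold pvRow
      rw [htake, pvMK_succ, ← hk0]
      cases hhit : pvHit a b n <;>
        simp [List.count_append, List.count_singleton] <;>
        exact fun h => hkk h.symm
    by_cases hmem : k0 ∈ a.take n
    · -- key already present: the modify branch
      have hct : D.contains k0 = true := hc.mpr hmem
      have hval : D.getD k0 []
          = [(List.count k0 (a.take n) : Int), (List.count k0 (pvMK a b n) : Int)] := by
        have hp : (k0, [(List.count k0 (a.take n) : Int), (List.count k0 (pvMK a b n) : Int)])
            ∈ D.items := by
          rw [hitems]
          exact List.mem_map.mpr ⟨k0, (PySem.Set.mem_ofList _ _).mpr hmem, rfl⟩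
        exact PySem.Dict.getD_of_mem_items D hp hnd []
      simp only [pvStepA, ← hk0, hct, Bool.true_eq_false, if_false, PySem.Dict.modify, hval]
      rw [PySem.Dict.items_insert_of_contains D _ hct, hitems, List.map_map, htake,
        pvOfList_snoc, if_pos hmem]
      refine (List.map_congr_left fun k hk => ?_).symm
      by_cases hkk : k = k0
      · subst hkk
        unfold pvRow
        rw [htake, pvMK_succ, ← hk0]
        cases hhit : pvHit a b n <;>
          simp [pvBumpA, List.count_append]
      · rw [hrow_ne k hkk]
        simp [pvRow, hkk]
    · -- fresh key: the insert branch
      have hcf : D.contains k0 = false := by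
        cases hcc : D.contains k0
        · rfl
        · exact absurd (hc.mp hcc) hmem
      have hc0 : List.count k0 (a.take n) = 0 := List.count_eq_zero.mpr hmem
      have hm0 : List.count k0 (pvMK a b n) = 0 :=
        List.count_eq_zero.mpr (fun hx => hmem (pvMK_sub a b n hn' k0 hx))
      have hrow_k0 : pvRow a b (n + 1) k0
          = (k0, [(1 : Int), if pvHit a b n then (1 : Int) else 0]) := by
        unfold pvRow
        rw [htake, pvMK_succ, ← hk0]
        cases hhit : pvHit a b n <;>
          simp [List.count_append, hc0, hm0]
      have hS : ∀ k ∈ PySem.Set.ofList (a.take n), k ≠ k0 := by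
        intro k hk hkk
        exact hmem (hkk ▸ (PySem.Set.mem_ofList _ _).mp hk)
      have hmapS : List.map (pvRow a b (n + 1)) (PySem.Set.ofList (a.take n))
          = List.map (pvRow a b n) (PySem.Set.ofList (a.take n)) :=
        List.map_congr_left fun k hk => hrow_ne k (hS k hk)
      rw [htake, pvOfList_snoc, if_neg hmem, List.map_append, hmapS]
      have hstep : pvStepA a b D n = D.insert k0 (if pvHit a b n then [1, 1] else [1, 0]) := by
        rw [pvStepA, ← hk0, hcf]
        cases pvHit a b n <;> simp
      rw [hstep, PySem.Dict.items_insert_of_not_contains D _ hcf, hitems]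
      simp [hrow_k0]
      cases pvHit a b n <;> simp

theorem pvMatch_eq (a b : List String) (n : Nat)
    (F : PySem.Dict String Int → Int → PySem.Dict String Int)
    (hF : ∀ d (i : Nat), F d (i : Int)
      = if pvHit a b i then d.insert (pvKey a i) (d.getD (pvKey a i) 0 + 1) else d) :
    (PySem.List.pyRange 0 (n : Int)).foldl F PySem.Dict.empty
      = PySem.Dict.counter (pvMK a b n) := by
  rw [PySem.List.pyRange_zero_natCast, List.foldl_map]
  have h2 : (fun (d : PySem.Dict String Int) (i : Nat) => F d (i : Int))
      = (fun d i => if pvHit a b i then (fun d x => d.insert x (d.getD x 0 + 1)) d (pvKey a i) else d) := by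
    funext d i; rw [hF]
  rw [h2, pvFold_if_filter, PySem.Dict.foldl_insert_getD_add_one_eq_counter]
  rfl

theorem pvA_eq (a b : List String) :
    count_correct a b
      = (PySem.Set.ofList a).map (pvRow a b a.length) := by
  unfold count_correct
  rw [show PySem.List.len a = ((a.length : Nat) : Int) from rfl,
    PySem.List.pyRange_zero_natCast, List.foldl_map]
  have h2 := pvA_items a b a.length le_rfl
  rw [List.take_length] at h2
  exact h2

theorem pvB_eq (a b : List String) :
    count_correct_alt a b
      = (PySem.Set.ofList a).map (pvRow a b a.length) := by
  simp only [count_correct_alt]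
  rw [show PySem.List.len a = ((a.length : Nat) : Int) from rfl,
    PySem.Dict.foldl_insert_getD_add_one_eq_counter,
    pvMatch_eq a b a.length _ (fun d i => rfl),
    PySem.Dict.items_counter, List.map_map]
  refine List.map_congr_left fun k hk => ?_
  simp [pvRow, PySem.Dict.getD_counter]

-- ===== VERDICT (by name: the statement is the Claim_ definition above) =====
theorem count_correct_spec : Claim_equal_count_correct := by
  intro a b _ _
  unfold Spec_count_correct
  exact (pvA_eq a b).trans (pvB_eq a b).symm
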